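-- pv_equiv track=rewrite | github.com/PedroDevSilva/exerciciosPythonCotuca | TecProg/lista4exs/ex13.py | contadorDuasListasWhile
-- ===== SOURCE A (Python) =====
-- def contadorDuasListasWhile(lista1,lista2):
--     i=0
--     contador=0
--     while i<len(lista1):
--         if lista1[i] in lista2:
--             j=0
--             while j <len(lista2):
--                 if lista1[i]==lista2[j]:
--                     contador+=1
--                 j+=1
--         i+=1
--     return contador
-- ===== SOURCE B (Python) =====
-- def contadorDuasListasWhile(lista1, lista2):
--     c1 = {}
--     for x in lista1:
--         c1[x] = c1.get(x, 0) + 1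
--     c2 = {}
--     for y in lista2:
--         c2[y] = c2.get(y, 0) + 1
--     total = 0
--     for v, n in c1.items():
--         total += n * c2.get(v, 0)
--     return total
-- ===== Notes on version B (the rewrite author's own statement) =====
-- stated objective: faster
-- what changed: Replaces A's per-element nested scan of lista2 by building two frequency dictionaries once and summing count1[v]*count2[v] over the distinct keys of the first.
import Mathlib
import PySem

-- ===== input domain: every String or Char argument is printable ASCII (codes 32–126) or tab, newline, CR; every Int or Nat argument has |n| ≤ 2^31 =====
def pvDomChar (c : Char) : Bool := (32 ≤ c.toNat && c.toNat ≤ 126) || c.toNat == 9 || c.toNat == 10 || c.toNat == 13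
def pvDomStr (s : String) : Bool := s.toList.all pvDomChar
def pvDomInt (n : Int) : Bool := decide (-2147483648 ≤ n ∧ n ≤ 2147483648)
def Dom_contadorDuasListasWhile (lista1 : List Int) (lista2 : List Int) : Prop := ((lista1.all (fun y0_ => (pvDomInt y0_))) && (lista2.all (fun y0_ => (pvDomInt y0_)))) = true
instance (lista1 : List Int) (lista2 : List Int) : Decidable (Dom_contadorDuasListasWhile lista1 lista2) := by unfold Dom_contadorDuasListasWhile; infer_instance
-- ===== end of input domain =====

-- B replaces A's per-element nested scan with two frequency dictionaries and one pass
-- over the distinct keys (objective: alternative algorithm of linear shape).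


-- ===== PORT A =====
-- outer while over lista1 (index i), guard 'lista1[i] in lista2', inner while over lista2 (index j)
def contadorDuasListasWhile (lista1 : List Int) (lista2 : List Int) : Int :=
  lista1.foldl
    (fun contador x =>
      if x ∈ lista2 then
        lista2.foldl (fun c y => if x = y then c + 1 else c) contador
      else contador)
    0

-- ===== PORT B =====
def contadorDuasListasWhile_alt (lista1 : List Int) (lista2 : List Int) : Int :=
  let c1 := lista1.foldl (fun d x => d.insert x (d.getD x 0 + 1)) PySem.Dict.empty
  let c2 := lista2.foldl (fun d y => d.insert y (d.getD y 0 + 1)) PySem.Dict.empty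
  c1.items.foldl (fun total p => total + p.2 * c2.getD p.1 0) 0

-- ===== PRECONDITION & SPEC =====
def Spec_contadorDuasListasWhile (lista1 : List Int) (lista2 : List Int) (out : Int) : Prop := out = contadorDuasListasWhile_alt lista1 lista2
instance (lista1 : List Int) (lista2 : List Int) (out : Int) : Decidable (Spec_contadorDuasListasWhile lista1 lista2 out) := by unfold Spec_contadorDuasListasWhile; infer_instance

-- ===== CLAIM (what is proved, stated in full; the proofs are below) =====
def Claim_equal_contadorDuasListasWhile : Prop := ∀ (lista1 : List Int) (lista2 : List Int), Dom_contadorDuasListasWhile lista1 lista2 → Spec_contadorDuasListasWhile lista1 lista2 (contadorDuasListasWhile lista1 lista2)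

-- ===== LEMMAS AND PROOFS =====

-- summing an indicator-weighted g over a nodup list containing x picks out g x
theorem sum_indicator (g : Int → Int) (d : List Int) (x : Int)
    (hnd : d.Nodup) (hx : x ∈ d) :
    (d.map (fun k => (if k = x then (1 : Int) else 0) * g k)).sum = g x := by
  induction d with
  | nil => cases hx
  | cons a t ih =>
    rcases List.nodup_cons.mp hnd with ⟨ha, ht⟩
    rcases List.mem_cons.mp hx with h | h
    · subst h
      have hz : (t.map (fun k => if k = x then g k else 0)).sum = 0 := by
        apply List.sum_eq_zero
        intro y hy
        rcases List.mem_map.mp hy with ⟨k, hk, rfl⟩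
        have hne : k ≠ x := fun h => ha (h ▸ hk)
        simp [hne]
      simp [hz]
    · have hax : a ≠ x := fun he => ha (he ▸ h)
      simp only [List.map_cons, List.sum_cons, ih ht h, if_neg hax]
      ring

-- ∑ over a nodup cover d of count·g equals the plain sum over the list
theorem sum_count_mul (g : Int → Int) (d : List Int) (hnd : d.Nodup) :
    ∀ (l : List Int), (∀ x ∈ l, x ∈ d) →
      (d.map (fun k => ((l.count k : Int)) * g k)).sum = (l.map g).sum := by
  intro l
  induction l with
  | nil => intro _; simp
  | cons x t ih =>
    intro hcov
    have hxd : x ∈ d := hcov x (List.mem_cons_self)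
    have htd : ∀ y ∈ t, y ∈ d := fun y hy => hcov y (List.mem_cons_of_mem _ hy)
    have hsplit :
        (d.map (fun k => (((x :: t).count k : Int)) * g k)).sum
          = (d.map (fun k => ((t.count k : Int)) * g k)).sum
            + (d.map (fun k => (if k = x then (1 : Int) else 0) * g k)).sum := by
      rw [← List.sum_map_add]
      apply congrArg
      apply List.map_congr_left
      intro k _
      by_cases hk : k = x
      · subst hk; simp only [List.count_cons_self]; push_cast; ring
      · have hcc : (x :: t).count k = t.count k := by
          simp [Ne.symm hk]
        rw [hcc]; simp [hk]
    rw [hsplit, ih htd, sum_indicator g d x hnd hxd]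
    simp [add_comm]

-- the inner while loop of A counts occurrences of x in l2, added to the accumulator
theorem innerA_count (x : Int) (l2 : List Int) :
    ∀ (a : Int),
      l2.foldl (fun c y => if x = y then c + 1 else c) a = a + (l2.count x : Int) := by
  induction l2 with
  | nil => intro a; simp
  | cons y t ih =>
    intro a
    simp only [List.foldl_cons]
    by_cases h : x = y
    · subst h
      rw [if_pos rfl, ih (a + 1), List.count_cons_self]
      push_cast; ring
    · rw [if_neg h, ih a]
      have hcc : (y :: t).count x = t.count x := by
        simp [Ne.symm h]
      rw [hcc]

-- A is the plain sum over lista1 of each element's count in lista2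
theorem portA_eq_sum (l1 l2 : List Int) :
    contadorDuasListasWhile l1 l2 = (l1.map (fun x => (l2.count x : Int))).sum := by
  unfold contadorDuasListasWhile
  suffices h : ∀ (l : List Int) (a : Int),
      l.foldl (fun contador x =>
        if x ∈ l2 then l2.foldl (fun c y => if x = y then c + 1 else c) contador
        else contador) a
      = a + (l.map (fun x => (l2.count x : Int))).sum by
    simpa using h l1 0
  intro l
  induction l with
  | nil => intro a; simp
  | cons x t ih =>
    intro a
    simp only [List.foldl_cons, List.map_cons, List.sum_cons]
    by_cases hx : x ∈ l2
    · rw [if_pos hx, innerA_count, ih]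
      ring
    · rw [if_neg hx, ih, List.count_eq_zero.mpr hx]
      push_cast; ring

-- B unfolded: counters, then the key pass as a sum over distinct keys
theorem portB_eq_sum (l1 l2 : List Int) :
    contadorDuasListasWhile_alt l1 l2
      = ((PySem.Set.ofList l1).map
          (fun k => ((l1.count k : Int)) * ((l2.count k : Int)))).sum := by
  unfold contadorDuasListasWhile_alt
  simp only [PySem.Dict.foldl_insert_getD_add_one_eq_counter]
  rw [show (fun (total : Int) (p : Int × Int) =>
        total + p.2 * (PySem.Dict.counter l2).getD p.1 0)
      = (fun total p => total + (fun p : Int × Int => p.2 * (l2.count p.1 : Int)) p) by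
      funext total p; rw [PySem.Dict.getD_counter]]
  rw [PySem.List.foldl_add, PySem.Dict.items_counter]
  simp [List.map_map, Function.comp_def]

-- ===== VERDICT (by name: the statement is the Claim_ definition above) =====
theorem contadorDuasListasWhile_spec : Claim_equal_contadorDuasListasWhile := by
  intro l1 l2 _
  unfold Spec_contadorDuasListasWhile
  rw [portA_eq_sum, portB_eq_sum]
  exact (sum_count_mul (fun k => (l2.count k : Int)) (PySem.Set.ofList l1)
    (PySem.Set.nodup_ofList l1) l1
    (fun x hx => (PySem.Set.mem_ofList l1 x).mpr hx)).symm
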